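-- pv_equiv track=rewrite | github.com/EsosaOrumwese/fraud-detection-system | scripts/dev_substrate/pr3_s4_dependency_drill.py | warm_gate_advisory_only
-- ===== SOURCE A (Python) =====
-- from typing import Any
--
-- def warm_gate_advisory_only(warm_gate_payload: dict[str, Any]) -> bool:
--     blocker_ids = {str(item).strip() for item in list(warm_gate_payload.get("blocker_ids") or []) if str(item).strip()}
--     if not blocker_ids:
--         return False
--     allowed = {
--         "PR3.S4.WARM.B12A_DL_BOOTSTRAP_PENDING",
--         "PR3.S4.WARM.B12F_IEG_NOT_OPERATIONALLY_READY",
--         "PR3.S4.WARM.B12K_OFP_NOT_OPERATIONALLY_READY",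
--     }
--     return blocker_ids.issubset(allowed)
-- ===== SOURCE B (Python) =====
-- def warm_gate_advisory_only(warm_gate_payload):
--     items = [str(x).strip() for x in (warm_gate_payload.get("blocker_ids") or [])]
--     allowed = (
--         "PR3.S4.WARM.B12A_DL_BOOTSTRAP_PENDING",
--         "PR3.S4.WARM.B12F_IEG_NOT_OPERATIONALLY_READY",
--         "PR3.S4.WARM.B12K_OFP_NOT_OPERATIONALLY_READY",
--     )
--     n_empty = sum(1 for s in items if not s)
--     n_ok = sum(1 for s in items if s in allowed)
--     return n_ok > 0 and n_empty + n_ok == len(items)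
-- ===== Notes on version B (the rewrite author's own statement) =====
-- stated objective: alternative
-- what changed: Replaces set construction plus issubset with an arithmetic counting formulation: count empty-stripped items and allowed items and decide by the count identity n_ok > 0 and n_empty + n_ok == len(items), with no set, no membership-of-collected-ids and no early exit.
import Mathlib
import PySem

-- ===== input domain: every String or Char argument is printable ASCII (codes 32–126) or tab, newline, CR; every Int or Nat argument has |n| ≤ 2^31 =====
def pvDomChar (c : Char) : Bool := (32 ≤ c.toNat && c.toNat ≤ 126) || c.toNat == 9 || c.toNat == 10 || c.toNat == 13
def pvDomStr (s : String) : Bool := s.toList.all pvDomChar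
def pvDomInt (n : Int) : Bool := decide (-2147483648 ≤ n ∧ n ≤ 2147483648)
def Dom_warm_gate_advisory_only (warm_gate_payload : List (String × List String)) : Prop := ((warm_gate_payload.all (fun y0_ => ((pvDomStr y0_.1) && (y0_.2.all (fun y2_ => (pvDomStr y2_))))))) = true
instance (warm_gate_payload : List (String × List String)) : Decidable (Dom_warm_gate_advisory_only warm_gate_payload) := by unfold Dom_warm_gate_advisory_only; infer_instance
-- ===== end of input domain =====

-- B replaces A's set construction + issubset with an arithmetic counting formulation
-- (count empty-stripped and allowed items, decide by n_ok > 0 && n_empty + n_ok = len);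
-- objective: alternative (same cost, no intermediate set, no subset test).


-- ===== PORT A =====
-- the literal `allowed` set of A
def pvAllowed : PySem.Set String :=
  PySem.Set.ofList
    ["PR3.S4.WARM.B12A_DL_BOOTSTRAP_PENDING",
     "PR3.S4.WARM.B12F_IEG_NOT_OPERATIONALLY_READY",
     "PR3.S4.WARM.B12K_OFP_NOT_OPERATIONALLY_READY"]

-- one step of A's set comprehension: add str(item).strip() if nonempty
def wgaStep (acc : PySem.Set String) (item : String) : PySem.Set String :=
  let s := PySem.Str.strip item
  if s ≠ "" then PySem.Set.add acc s else acc

def warm_gate_advisory_only (warm_gate_payload : List (String × List String)) : Bool :=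
  -- blocker_ids = {str(item).strip() for item in list(payload.get("blocker_ids") or []) if str(item).strip()}
  let blocker_ids : PySem.Set String :=
    ((warm_gate_payload.lookup "blocker_ids").getD []).foldl wgaStep PySem.Set.empty
  if blocker_ids.isEmpty then false
  else PySem.Set.issubset blocker_ids pvAllowed

-- ===== PORT B =====
-- B's `allowed` tuple (membership = linear scan, no set)
def pvAllowedL : List String :=
  ["PR3.S4.WARM.B12A_DL_BOOTSTRAP_PENDING",
   "PR3.S4.WARM.B12F_IEG_NOT_OPERATIONALLY_READY",
   "PR3.S4.WARM.B12K_OFP_NOT_OPERATIONALLY_READY"]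

def warm_gate_advisory_only_alt (warm_gate_payload : List (String × List String)) : Bool :=
  -- items = [str(x).strip() for x in (payload.get("blocker_ids") or [])]
  let items := ((warm_gate_payload.lookup "blocker_ids").getD []).map PySem.Str.strip
  -- n_empty = sum(1 for s in items if not s); n_ok = sum(1 for s in items if s in allowed)
  let n_empty := (items.filter (fun s => s == "")).length
  let n_ok := (items.filter (fun s => pvAllowedL.contains s)).length
  decide (0 < n_ok) && decide (n_empty + n_ok = items.length)

-- ===== PRECONDITION & SPEC =====
def Spec_warm_gate_advisory_only (warm_gate_payload : List (String × List String)) (out : Bool) : Prop := out = warm_gate_advisory_only_alt warm_gate_payload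
instance (warm_gate_payload : List (String × List String)) (out : Bool) : Decidable (Spec_warm_gate_advisory_only warm_gate_payload out) := by unfold Spec_warm_gate_advisory_only; infer_instance

-- ===== CLAIM (what is proved, stated in full; the proofs are below) =====
def Claim_equal_warm_gate_advisory_only : Prop := ∀ (warm_gate_payload : List (String × List String)), Dom_warm_gate_advisory_only warm_gate_payload → Spec_warm_gate_advisory_only warm_gate_payload (warm_gate_advisory_only warm_gate_payload)

-- ===== LEMMAS AND PROOFS =====

-- "item is fine for A": empty after strip, or allowed
def wgaOk (i : String) : Bool :=
  decide (PySem.Str.strip i = "") || PySem.Set.contains pvAllowed (PySem.Str.strip i)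

-- "item contributes an id": nonempty after strip
def wgaNe (i : String) : Bool := !decide (PySem.Str.strip i = "")

lemma wgaStep_of_empty {item : String} (acc : PySem.Set String)
    (hs : PySem.Str.strip item = "") : wgaStep acc item = acc := by
  simp [wgaStep, hs]

lemma wgaStep_of_ne {item : String} (acc : PySem.Set String)
    (hs : PySem.Str.strip item ≠ "") :
    wgaStep acc item = PySem.Set.add acc (PySem.Str.strip item) := by
  simp [wgaStep, hs]

lemma add_all (acc : PySem.Set String) (s : String) (f : String → Bool) :
    (PySem.Set.add acc s).all f = (acc.all f && f s) := by
  by_cases hm : s ∈ acc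
  · have hadd : PySem.Set.add acc s = acc := by
      simp [PySem.Set.add, PySem.Set.contains, hm]
    rw [hadd]
    cases hf : f s
    · have : acc.all f = false := List.all_eq_false.mpr ⟨s, hm, by simp [hf]⟩
      simp [this]
    · simp
  · have hadd : PySem.Set.add acc s = acc ++ [s] := by
      simp [PySem.Set.add, PySem.Set.contains, hm]
    simp [hadd]

lemma add_ne_nil (acc : PySem.Set String) (s : String) :
    PySem.Set.add acc s ≠ [] := by
  by_cases hm : s ∈ acc
  · have hadd : PySem.Set.add acc s = acc := by
      simp [PySem.Set.add, PySem.Set.contains, hm]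
    rw [hadd]
    exact List.ne_nil_of_mem hm
  · have hadd : PySem.Set.add acc s = acc ++ [s] := by
      simp [PySem.Set.add, PySem.Set.contains, hm]
    simp [hadd]

lemma fold_ne_nil (l : List String) (acc : PySem.Set String) (h : acc ≠ []) :
    l.foldl wgaStep acc ≠ [] := by
  induction l generalizing acc with
  | nil => simpa using h
  | cons item rest ih =>
      simp only [List.foldl_cons]
      by_cases hs : PySem.Str.strip item = ""
      · rw [wgaStep_of_empty acc hs]; exact ih acc h
      · rw [wgaStep_of_ne acc hs]
        exact ih _ (add_ne_nil acc _)

lemma fold_all (l : List String) (acc : PySem.Set String) :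
    (l.foldl wgaStep acc).all (fun x => PySem.Set.contains pvAllowed x)
      = (acc.all (fun x => PySem.Set.contains pvAllowed x) && l.all wgaOk) := by
  induction l generalizing acc with
  | nil => simp
  | cons item rest ih =>
      simp only [List.foldl_cons, List.all_cons]
      by_cases hs : PySem.Str.strip item = ""
      · rw [wgaStep_of_empty acc hs, ih]
        simp [wgaOk, hs]
      · rw [wgaStep_of_ne acc hs, ih, add_all]
        simp only [wgaOk, hs, decide_false, Bool.false_or]
        simp [Bool.and_assoc, Bool.and_comm]

lemma fold_isEmpty (l : List String) (acc : PySem.Set String) :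
    (l.foldl wgaStep acc).isEmpty = (acc.isEmpty && !l.any wgaNe) := by
  induction l generalizing acc with
  | nil => simp
  | cons item rest ih =>
      simp only [List.foldl_cons, List.any_cons]
      by_cases hs : PySem.Str.strip item = ""
      · rw [wgaStep_of_empty acc hs, ih]
        simp [wgaNe, hs]
      · rw [wgaStep_of_ne acc hs]
        have h1 : (rest.foldl wgaStep (PySem.Set.add acc (PySem.Str.strip item))).isEmpty = false := by
          simp [fold_ne_nil rest _ (add_ne_nil acc _)]
        rw [h1]
        simp [wgaNe, hs]

lemma issubset_eq_all (s t : PySem.Set String) :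
    PySem.Set.issubset s t = s.all (fun x => PySem.Set.contains t x) := rfl

-- B-side predicates: empty after strip / member of the allowed tuple
def eB (s : String) : Bool := s == ""
def kB (s : String) : Bool := decide (s ∈ pvAllowedL)

-- A's allowed set (built by ofList) is exactly B's allowed tuple as a list
lemma allowed_lists : pvAllowed = pvAllowedL := by decide

-- an empty item is never counted as allowed, so the two counts are disjoint
lemma disj {s : String} (h : eB s = true) : kB s = false := by
  have hs : s = "" := by simpa [eB] using h
  subst hs; decide

lemma counts_le (m : List String) :
    m.countP eB + m.countP kB ≤ m.length := by
  induction m with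
  | nil => simp
  | cons s rest ih =>
      simp only [List.countP_cons, List.length_cons]
      by_cases he : eB s = true
      · simp [he, disj he]; omega
      · cases hk : kB s <;> simp [he] <;> omega

lemma all_eq_counts (m : List String) :
    m.all (fun s => eB s || kB s)
      = decide (m.countP eB + m.countP kB = m.length) := by
  induction m with
  | nil => simp
  | cons s rest ih =>
      have hle := counts_le rest
      simp only [List.all_cons, List.countP_cons, List.length_cons, ih]
      by_cases he : eB s = true
      · simp only [he, disj he, Bool.true_or, Bool.true_and, if_true]
        rw [Bool.eq_iff_iff]; simp; omega
      · simp only [Bool.not_eq_true] at he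
        simp only [he, Bool.false_or]
        cases hk : kB s
        · simp only [Bool.false_and]
          rw [Bool.eq_iff_iff]; simp; omega
        · simp only [Bool.true_and, if_true]
          rw [Bool.eq_iff_iff]; simp; omega

lemma any_eq_counts (m : List String)
    (h : m.all (fun s => eB s || kB s) = true) :
    m.any (fun s => !(eB s)) = decide (0 < m.countP kB) := by
  induction m with
  | nil => simp
  | cons s rest ih =>
      simp only [List.all_cons, Bool.and_eq_true] at h
      simp only [List.any_cons, List.countP_cons]
      by_cases he : eB s = true
      · simp only [he, disj he, Bool.not_true, Bool.false_or]
        exact ih h.2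
      · have hk : kB s = true := by
          rcases Bool.or_eq_true_iff.mp h.1 with h' | h'
          · exact absurd h' he
          · exact h'
        simp only [Bool.not_eq_true] at he
        simp only [he, hk, Bool.not_false, Bool.true_or, if_true]
        rw [Bool.eq_iff_iff]; simp

-- ===== VERDICT (by name: the statement is the Claim_ definition above) =====
theorem warm_gate_advisory_only_spec : Claim_equal_warm_gate_advisory_only := by
  intro p _
  unfold Spec_warm_gate_advisory_only warm_gate_advisory_only warm_gate_advisory_only_alt
  simp only [issubset_eq_all, fold_all, fold_isEmpty, PySem.Set.empty]
  set l := (p.lookup "blocker_ids").getD [] with hl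
  have hpredE : (fun s => s == "") = eB := rfl
  have hpredK : (fun s : String => pvAllowedL.contains s) = kB := by
    funext s; simp [kB]
  rw [← List.countP_eq_length_filter, ← List.countP_eq_length_filter, hpredE, hpredK]
  set m := l.map PySem.Str.strip with hm
  have hmaplen : m.length = l.length := by simp [hm]
  have hfunOk : wgaOk = fun x => eB (PySem.Str.strip x) || kB (PySem.Str.strip x) := by
    funext x; simp [wgaOk, eB, kB, allowed_lists, ← Bool.beq_eq_decide_eq]
  have hfunNe : wgaNe = fun x => !(eB (PySem.Str.strip x)) := by
    funext x; simp [wgaNe, eB, ← Bool.beq_eq_decide_eq]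
  have hall : l.all wgaOk = m.all (fun s => eB s || kB s) := by
    rw [hm, List.all_map, hfunOk]; rfl
  have hany : l.any wgaNe = m.any (fun s => !(eB s)) := by
    rw [hm, List.any_map, hfunNe]; rfl
  cases hA : m.all (fun s => eB s || kB s)
  · have h1 : l.all wgaOk = false := by rw [hall, hA]
    have h2 : decide (m.countP eB + m.countP kB = m.length) = false := by
      rw [← all_eq_counts, hA]
    rw [h1]
    simp [h2]
  · have h1 : l.all wgaOk = true := by rw [hall, hA]
    have h2 : decide (m.countP eB + m.countP kB = m.length) = true := by
      rw [← all_eq_counts, hA]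
    have h3 : l.any wgaNe = decide (0 < m.countP kB) := by
      rw [hany]; exact any_eq_counts m hA
    rw [h1, h3, h2]
    cases hd : decide (0 < m.countP kB) <;> simp
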